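-- pv_equiv track=rewrite | github.com/KhwarizmiAnalytix/Hisab | Scripts/setup_bazel.py | _merge_dotted_segments
-- ===== SOURCE A (Python) =====
-- from typing import Dict, List, Optional
--
-- _CMAKE_SAN_TO_BAZEL = {
--     "address": "asan",
--     "undefined": "ubsan",
--     "thread": "tsan",
--     "memory": "msan",
--     "leak": "lsan",
-- }
--
-- def _merge_dotted_segments(parts: List[str]) -> List[str]:
--     """Merge split segments like parallel.openmp, sanitizer.address into single tokens."""
--     out: List[str] = []
--     pl = [p.lower() for p in parts]
--     i = 0
--     while i < len(pl):
--         if pl[i] == "parallel" and i + 1 < len(pl) and pl[i + 1] in ("std", "openmp", "tbb"):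
--             out.append(f"parallel.{pl[i + 1]}")
--             i += 2
--         elif pl[i] == "sanitizer" and i + 1 < len(pl) and pl[i + 1] in _CMAKE_SAN_TO_BAZEL:
--             out.append(_CMAKE_SAN_TO_BAZEL[pl[i + 1]])
--             i += 2
--         elif pl[i] == "profiler" and i + 1 < len(pl) and pl[i + 1] in ("kineto", "itt", "native"):
--             out.append(f"profiler_{pl[i + 1]}")
--             i += 2
--         elif pl[i] == "logging" and i + 1 < len(pl) and pl[i + 1] in ("native", "loguru", "glog"):
--             out.append(f"logging_{pl[i + 1]}")
--             i += 2
--         else: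
--             out.append(pl[i])
--             i += 1
--     return out
-- ===== SOURCE B (Python) =====
-- _PAIR_MERGE = {
--     ("parallel", "std"): "parallel.std",
--     ("parallel", "openmp"): "parallel.openmp",
--     ("parallel", "tbb"): "parallel.tbb",
--     ("sanitizer", "address"): "asan",
--     ("sanitizer", "undefined"): "ubsan",
--     ("sanitizer", "thread"): "tsan",
--     ("sanitizer", "memory"): "msan",
--     ("sanitizer", "leak"): "lsan",
--     ("profiler", "kineto"): "profiler_kineto",
--     ("profiler", "itt"): "profiler_itt",
--     ("profiler", "native"): "profiler_native",
--     ("logging", "native"): "logging_native",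
--     ("logging", "loguru"): "logging_loguru",
--     ("logging", "glog"): "logging_glog",
-- }
--
--
-- def _merge_dotted_segments(parts):
--     """Single pass carrying one pending token; a pair table replaces the if/elif chain."""
--     out = []
--     pending = None  # lowercased token still waiting for a possible partner
--     for p in parts:
--         t = p.lower()
--         if pending is None:
--             pending = t
--             continue
--         merged = _PAIR_MERGE.get((pending, t))
--         if merged is not None:
--             out.append(merged)
--             pending = None
--         else:
--             out.append(pending)
--             pending = t
--     if pending is not None:
--         out.append(pending)
--     return out
-- ===== Notes on version B (the rewrite author's own statement) =====
-- stated objective: alternative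
-- what changed: Replaced the index-based while loop with its four-branch if/elif chain of string comparisons by a single forward fold that carries one pending lowercased token and resolves merges through one (first,second)->merged pair dict lookup.
import Mathlib
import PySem

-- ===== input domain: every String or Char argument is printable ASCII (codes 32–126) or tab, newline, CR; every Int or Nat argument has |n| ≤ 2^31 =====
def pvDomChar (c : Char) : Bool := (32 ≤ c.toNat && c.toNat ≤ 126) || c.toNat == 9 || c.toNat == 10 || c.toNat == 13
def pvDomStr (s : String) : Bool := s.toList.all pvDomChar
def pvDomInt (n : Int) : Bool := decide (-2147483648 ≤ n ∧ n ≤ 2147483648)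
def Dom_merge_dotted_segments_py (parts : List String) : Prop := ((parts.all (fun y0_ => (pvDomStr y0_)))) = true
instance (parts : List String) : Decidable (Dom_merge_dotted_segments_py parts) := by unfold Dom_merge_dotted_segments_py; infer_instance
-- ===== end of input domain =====

-- B is an alternative implementation: a single forward fold carrying one pending token and
-- one (first,second)->merged pair table, instead of A's index-based while loop with an if/elif chain.

-- ===== PORT A =====
-- A-side helper: the module-level _CMAKE_SAN_TO_BAZEL dict
def cmakeSanToBazel : PySem.Dict String String :=
  PySem.Dict.ofList [("address", "asan"), ("undefined", "ubsan"), ("thread", "tsan"),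
   ("memory", "msan"), ("leak", "lsan")]

-- A's while loop: state (i, out), pl fixed
def mergeLoopA (pl : List String) (i : Nat) (out : List String) : List String :=
  if _h : i < pl.length then
    let c := pl.getD i ""
    let n := pl.getD (i + 1) ""
    if c = "parallel" ∧ i + 1 < pl.length ∧ (n = "std" ∨ n = "openmp" ∨ n = "tbb") then
      mergeLoopA pl (i + 2) (out ++ [String.ofList ("parallel.".toList ++ n.toList)])
    else if c = "sanitizer" ∧ i + 1 < pl.length ∧ (cmakeSanToBazel.get? n).isSome then
      mergeLoopA pl (i + 2) (out ++ [(cmakeSanToBazel.get? n).getD ""])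
    else if c = "profiler" ∧ i + 1 < pl.length ∧ (n = "kineto" ∨ n = "itt" ∨ n = "native") then
      mergeLoopA pl (i + 2) (out ++ [String.ofList ("profiler_".toList ++ n.toList)])
    else if c = "logging" ∧ i + 1 < pl.length ∧ (n = "native" ∨ n = "loguru" ∨ n = "glog") then
      mergeLoopA pl (i + 2) (out ++ [String.ofList ("logging_".toList ++ n.toList)])
    else
      mergeLoopA pl (i + 1) (out ++ [c])
  else out
termination_by pl.length - i

def merge_dotted_segments_py (parts : List String) : List String :=
  let pl := parts.map PySem.Str.lower
  mergeLoopA pl 0 []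

-- ===== PORT B =====
-- B-side helper: the _PAIR_MERGE table
def pairMergeTable : PySem.Dict (String × String) String :=
  PySem.Dict.ofList [(("parallel", "std"), "parallel.std"),
   (("parallel", "openmp"), "parallel.openmp"),
   (("parallel", "tbb"), "parallel.tbb"),
   (("sanitizer", "address"), "asan"),
   (("sanitizer", "undefined"), "ubsan"),
   (("sanitizer", "thread"), "tsan"),
   (("sanitizer", "memory"), "msan"),
   (("sanitizer", "leak"), "lsan"),
   (("profiler", "kineto"), "profiler_kineto"),
   (("profiler", "itt"), "profiler_itt"),
   (("profiler", "native"), "profiler_native"),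
   (("logging", "native"), "logging_native"),
   (("logging", "loguru"), "logging_loguru"),
   (("logging", "glog"), "logging_glog")]

-- B's for loop: fold over parts carrying (pending, out)
def mergeFoldB : List String → Option String → List String → List String
  | [], none, out => out
  | [], some p, out => out ++ [p]
  | x :: rest, pending, out =>
    let t := PySem.Str.lower x
    match pending with
    | none => mergeFoldB rest (some t) out
    | some p =>
      match pairMergeTable.get? (p, t) with
      | some m => mergeFoldB rest none (out ++ [m])
      | none => mergeFoldB rest (some t) (out ++ [p])

def merge_dotted_segments_py_alt (parts : List String) : List String :=
  mergeFoldB parts none []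

-- ===== PRECONDITION & SPEC =====
def Spec_merge_dotted_segments_py (parts : List String) (out : List String) : Prop := out = merge_dotted_segments_py_alt parts
instance (parts : List String) (out : List String) : Decidable (Spec_merge_dotted_segments_py parts out) := by unfold Spec_merge_dotted_segments_py; infer_instance

-- ===== CLAIM (what is proved, stated in full; the proofs are below) =====
def Claim_equal_merge_dotted_segments_py : Prop := ∀ (parts : List String), Dom_merge_dotted_segments_py parts → Spec_merge_dotted_segments_py parts (merge_dotted_segments_py parts)

-- ===== LEMMAS AND PROOFS =====

-- Common characterization: pairwise merge of a lowercased token list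
def mergePairs : List String → List String
  | [] => []
  | [a] => [a]
  | a :: b :: rest =>
    match pairMergeTable.get? (a, b) with
    | some m => m :: mergePairs rest
    | none => a :: mergePairs (b :: rest)

-- the pair-table lookup agrees with A's if/elif chain
set_option maxHeartbeats 2000000 in
lemma table_eq_chain (c n : String) :
    pairMergeTable.get? (c, n) =
      if c = "parallel" ∧ (n = "std" ∨ n = "openmp" ∨ n = "tbb") then
        some (String.ofList ("parallel.".toList ++ n.toList))
      else if c = "sanitizer" ∧ (cmakeSanToBazel.get? n).isSome then
        some ((cmakeSanToBazel.get? n).getD "")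
      else if c = "profiler" ∧ (n = "kineto" ∨ n = "itt" ∨ n = "native") then
        some (String.ofList ("profiler_".toList ++ n.toList))
      else if c = "logging" ∧ (n = "native" ∨ n = "loguru" ∨ n = "glog") then
        some (String.ofList ("logging_".toList ++ n.toList))
      else none := by
  rw [show pairMergeTable = PySem.Dict.mk
        [(("parallel", "std"), "parallel.std"),
         (("parallel", "openmp"), "parallel.openmp"),
         (("parallel", "tbb"), "parallel.tbb"),
         (("sanitizer", "address"), "asan"),
         (("sanitizer", "undefined"), "ubsan"),
         (("sanitizer", "thread"), "tsan"),
         (("sanitizer", "memory"), "msan"),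
         (("sanitizer", "leak"), "lsan"),
         (("profiler", "kineto"), "profiler_kineto"),
         (("profiler", "itt"), "profiler_itt"),
         (("profiler", "native"), "profiler_native"),
         (("logging", "native"), "logging_native"),
         (("logging", "loguru"), "logging_loguru"),
         (("logging", "glog"), "logging_glog")] from by decide,
      show cmakeSanToBazel = PySem.Dict.mk
        [("address", "asan"), ("undefined", "ubsan"), ("thread", "tsan"),
         ("memory", "msan"), ("leak", "lsan")] from by decide]
  by_cases hp : c = "parallel"
  · subst hp
    by_cases h1 : n = "std"; · subst h1; decide
    by_cases h2 : n = "openmp"; · subst h2; decide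
    by_cases h3 : n = "tbb"; · subst h3; decide
    simp only [PySem.Dict.get?_mk_cons, beq_iff_eq, Prod.mk.injEq]
    simp [Ne.symm h1, Ne.symm h2, Ne.symm h3, h1, h2, h3, PySem.Dict.get?]
  by_cases hs : c = "sanitizer"
  · subst hs
    by_cases h1 : n = "address"; · subst h1; decide
    by_cases h2 : n = "undefined"; · subst h2; decide
    by_cases h3 : n = "thread"; · subst h3; decide
    by_cases h4 : n = "memory"; · subst h4; decide
    by_cases h5 : n = "leak"; · subst h5; decide
    simp only [PySem.Dict.get?_mk_cons, beq_iff_eq, Prod.mk.injEq]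
    simp [Ne.symm h1, Ne.symm h2, Ne.symm h3, Ne.symm h4, Ne.symm h5, PySem.Dict.get?]
  by_cases hf : c = "profiler"
  · subst hf
    by_cases h1 : n = "kineto"; · subst h1; decide
    by_cases h2 : n = "itt"; · subst h2; decide
    by_cases h3 : n = "native"; · subst h3; decide
    simp only [PySem.Dict.get?_mk_cons, beq_iff_eq, Prod.mk.injEq]
    simp [Ne.symm h1, Ne.symm h2, Ne.symm h3, h1, h2, h3, PySem.Dict.get?]
  by_cases hl : c = "logging"
  · subst hl
    by_cases h1 : n = "native"; · subst h1; decide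
    by_cases h2 : n = "loguru"; · subst h2; decide
    by_cases h3 : n = "glog"; · subst h3; decide
    simp only [PySem.Dict.get?_mk_cons, beq_iff_eq, Prod.mk.injEq]
    simp [Ne.symm h1, Ne.symm h2, Ne.symm h3, h1, h2, h3, PySem.Dict.get?]
  · simp only [PySem.Dict.get?_mk_cons, beq_iff_eq, Prod.mk.injEq]
    simp [Ne.symm hp, Ne.symm hs, Ne.symm hf, Ne.symm hl, hp, hs, hf, hl, PySem.Dict.get?]

-- A's loop equals mergePairs on the remaining suffix
set_option maxHeartbeats 2000000 in
lemma mergeLoopA_eq (pl : List String) : ∀ i out, mergeLoopA pl i out = out ++ mergePairs (pl.drop i) := by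
  suffices H : ∀ (k i : Nat) (out : List String), pl.length - i ≤ k →
      mergeLoopA pl i out = out ++ mergePairs (pl.drop i) by
    intro i out; exact H (pl.length - i) i out le_rfl
  intro k
  induction k with
  | zero =>
    intro i out hk
    have hge : pl.length ≤ i := by omega
    rw [mergeLoopA, dif_neg (by omega)]
    simp [List.drop_eq_nil_of_le hge, mergePairs]
  | succ k ih =>
    intro i out hk
    by_cases hi : i < pl.length
    · have hc : pl.getD i "" = pl[i] := List.getD_eq_getElem pl "" hi
      have hdrop : pl.drop i = pl[i] :: pl.drop (i + 1) := List.drop_eq_getElem_cons hi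
      by_cases hi1 : i + 1 < pl.length
      · have hn : pl.getD (i + 1) "" = pl[i + 1] := List.getD_eq_getElem pl "" hi1
        have hdrop1 : pl.drop (i + 1) = pl[i + 1] :: pl.drop (i + 2) :=
          List.drop_eq_getElem_cons hi1
        have htab := table_eq_chain pl[i] pl[i + 1]
        rw [mergeLoopA, dif_pos hi]
        simp only [hc, hn]
        rcases hget : pairMergeTable.get? (pl[i], pl[i + 1]) with _ | m
        · -- no merge: every branch condition is false
          rw [hget] at htab
          split_ifs at htab with c1 c2 c3 c4
          rw [if_neg (by tauto), if_neg (by tauto), if_neg (by tauto), if_neg (by tauto),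
            ih (i + 1) (out ++ [pl[i]]) (by omega), hdrop, hdrop1, mergePairs, hget]
          simp
        · -- merge: exactly one branch fires and appends m
          rw [hget] at htab
          have hmp : mergePairs (pl.drop i) = m :: mergePairs (pl.drop (i + 2)) := by
            rw [hdrop, hdrop1, mergePairs, hget]
          split_ifs at htab with c1 c2 c3 c4
          · obtain rfl := Option.some.inj htab
            rw [if_pos ⟨c1.1, hi1, c1.2⟩, ih (i + 2) _ (by omega), hmp]
            simp
          · obtain rfl := Option.some.inj htab
            rw [if_neg (by tauto), if_pos ⟨c2.1, hi1, c2.2⟩, ih (i + 2) _ (by omega), hmp]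
            simp
          · obtain rfl := Option.some.inj htab
            rw [if_neg (by tauto), if_neg (by tauto), if_pos ⟨c3.1, hi1, c3.2⟩,
              ih (i + 2) _ (by omega), hmp]
            simp
          · obtain rfl := Option.some.inj htab
            rw [if_neg (by tauto), if_neg (by tauto), if_neg (by tauto),
              if_pos ⟨c4.1, hi1, c4.2⟩, ih (i + 2) _ (by omega), hmp]
            simp
      · -- last element: all pair conditions fail on i + 1 < len
        rw [mergeLoopA, dif_pos hi,
          if_neg (by tauto), if_neg (by tauto), if_neg (by tauto), if_neg (by tauto),
          hc, ih (i + 1) (out ++ [pl[i]]) (by omega), hdrop,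
          List.drop_eq_nil_of_le (show pl.length ≤ i + 1 by omega)]
        simp [mergePairs]
    · rw [mergeLoopA, dif_neg hi,
        List.drop_eq_nil_of_le (show pl.length ≤ i by omega)]
      simp [mergePairs]

-- B's fold equals mergePairs with the pending token put back in front
lemma mergeFoldB_eq : ∀ (xs : List String) (pending : Option String) (out : List String),
    mergeFoldB xs pending out =
      out ++ mergePairs ((pending.toList) ++ xs.map PySem.Str.lower) := by
  intro xs
  induction xs with
  | nil =>
    rintro (_ | p) out <;> simp [mergeFoldB, mergePairs]
  | cons x rest ih =>
    rintro (_ | p) out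
    · rw [mergeFoldB]
      simp only [Option.toList, List.nil_append, List.map_cons]
      exact ih (some (PySem.Str.lower x)) out
    · rw [mergeFoldB]
      simp only [Option.toList, List.map_cons]
      rcases hget : pairMergeTable.get? (p, PySem.Str.lower x) with _ | m
      · dsimp only
        rw [ih (some (PySem.Str.lower x)) (out ++ [p])]
        simp [mergePairs, hget]
      · dsimp only
        rw [ih none (out ++ [m])]
        simp [mergePairs, hget]

-- ===== VERDICT (by name: the statement is the Claim_ definition above) =====
theorem merge_dotted_segments_py_spec : Claim_equal_merge_dotted_segments_py := by
  intro parts _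
  unfold Spec_merge_dotted_segments_py merge_dotted_segments_py merge_dotted_segments_py_alt
  rw [mergeLoopA_eq, mergeFoldB_eq]
  simp
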